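-- pv_equiv track=rewrite | github.com/andrevzs/RA2-19 | arvore_assembly.py | _extrair_linhas_tokens_de_programa
-- ===== SOURCE A (Python) =====
-- def _extrair_linhas_tokens_de_programa(tokens_programa):
--     """Converte o vetor de tokens estruturado em linhas de comando com parênteses."""
--     if not tokens_programa:
--         return []
--
--     linhas = []
--     atual = []
--
--     for tipo, valor in tokens_programa:
--         if tipo == "START_CMD" or tipo == "END_CMD":
--             continue
--
--         if tipo == "EOL":
--             if atual:
--                 linhas.append(atual)
--                 atual = []
--             continue
--
--         if tipo == "LPAREN":
--             atual.append("(")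
--         elif tipo == "RPAREN":
--             atual.append(")")
--         elif tipo == "OPERADOR":
--             atual.append(valor)
--         elif tipo in {"INT", "REAL", "ID", "RES", "SET", "GET", "IF", "IFELSE", "WHILE", "BLOCK"}:
--             atual.append(valor if valor is not None else tipo)
--
--     if atual:
--         linhas.append(atual)
--
--     return linhas
-- ===== SOURCE B (Python) =====
-- _NOMEADOS = {"INT", "REAL", "ID", "RES", "SET", "GET", "IF", "IFELSE", "WHILE", "BLOCK"}
--
--
-- def _converter_token(tipo, valor):
--     """Convert one token to its textual form, or None if it produces no output."""
--     if tipo == "LPAREN":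
--         return "("
--     if tipo == "RPAREN":
--         return ")"
--     if tipo == "OPERADOR":
--         return valor
--     if tipo in _NOMEADOS:
--         return valor if valor is not None else tipo
--     return None
--
--
-- def _extrair_linhas_tokens_de_programa(tokens_programa):
--     """Converte o vetor de tokens estruturado em linhas de comando com parênteses."""
--     # First pass: partition the token stream into segments split on every EOL token
--     # (the trailing unterminated segment included).
--     segmentos = []
--     atual = []
--     for tok in tokens_programa:
--         if tok[0] == "EOL":
--             segmentos.append(atual)
--             atual = []
--         else:
--             atual.append(tok)
--     segmentos.append(atual)
--
--     # Second pass: map each segment through the conversion rules and keep it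
--     # only when something remains.
--     linhas = []
--     for seg in segmentos:
--         linha = [c for c in (_converter_token(t, v) for t, v in seg) if c is not None]
--         if linha:
--             linhas.append(linha)
--     return linhas
-- ===== Notes on version B (the rewrite author's own statement) =====
-- stated objective: alternative
-- what changed: B splits the token stream into EOL-delimited segments first, then maps each segment through a single token-conversion helper and keeps only non-empty mapped lines, instead of A's one inline loop with a flush-on-EOL accumulator and if/elif chain.
-- outside the precondition, e.g. on _extrair_linhas_tokens_de_programa([('OPERADOR', None)]): A returns [[None]], B returns []
import Mathlib
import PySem

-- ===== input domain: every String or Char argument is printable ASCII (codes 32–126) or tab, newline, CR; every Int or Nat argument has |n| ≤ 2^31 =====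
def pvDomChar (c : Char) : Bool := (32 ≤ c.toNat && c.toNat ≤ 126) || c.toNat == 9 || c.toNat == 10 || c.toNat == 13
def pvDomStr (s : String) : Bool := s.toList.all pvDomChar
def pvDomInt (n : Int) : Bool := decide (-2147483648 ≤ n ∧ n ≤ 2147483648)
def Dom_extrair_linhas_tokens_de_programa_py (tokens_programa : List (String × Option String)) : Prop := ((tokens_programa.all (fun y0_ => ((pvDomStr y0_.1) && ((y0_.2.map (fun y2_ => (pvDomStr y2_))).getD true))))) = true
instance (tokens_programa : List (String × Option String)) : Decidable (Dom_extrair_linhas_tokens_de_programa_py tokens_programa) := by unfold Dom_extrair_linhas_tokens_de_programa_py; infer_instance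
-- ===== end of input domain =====

-- B splits the token stream into EOL-delimited segments first, then maps each segment
-- through one token-conversion helper, keeping only non-empty mapped lines (objective: alternative decomposition).

-- ===== PORT A =====
def pvNomeados : List String := ["INT", "REAL", "ID", "RES", "SET", "GET", "IF", "IFELSE", "WHILE", "BLOCK"]

def pvStepA (st : List (List String) × List String) (tv : String × Option String) :
    List (List String) × List String :=
  let linhas := st.1
  let atual := st.2
  let tipo := tv.1
  let valor := tv.2
  if tipo = "START_CMD" ∨ tipo = "END_CMD" then (linhas, atual)
  else if tipo = "EOL" then
    if atual ≠ [] then (linhas ++ [atual], []) else (linhas, atual)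
  else if tipo = "LPAREN" then (linhas, atual ++ ["("])
  else if tipo = "RPAREN" then (linhas, atual ++ [")"])
  -- OPERADOR: Python appends `valor` directly; Pre_ guarantees it is not None, so getD is never taken
  else if tipo = "OPERADOR" then (linhas, atual ++ [valor.getD tipo])
  else if tipo ∈ pvNomeados then (linhas, atual ++ [valor.getD tipo])
  else (linhas, atual)

def extrair_linhas_tokens_de_programa_py (tokens_programa : List (String × Option String)) : List (List String) :=
  if tokens_programa = [] then []
  else
    let st := tokens_programa.foldl pvStepA ([], [])
    if st.2 ≠ [] then st.1 ++ [st.2] else st.1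

-- ===== PORT B =====
def pvConverterToken (tipo : String) (valor : Option String) : Option String :=
  if tipo = "LPAREN" then some "("
  else if tipo = "RPAREN" then some ")"
  else if tipo = "OPERADOR" then valor
  else if tipo ∈ pvNomeados then some (valor.getD tipo)
  else none

def extrair_linhas_tokens_de_programa_py_alt (tokens_programa : List (String × Option String)) : List (List String) :=
  let sp := tokens_programa.foldl
    (fun (st : List (List (String × Option String)) × List (String × Option String)) tok =>
      if tok.1 = "EOL" then (st.1 ++ [st.2], []) else (st.1, st.2 ++ [tok]))
    ([], [])
  let segmentos := sp.1 ++ [sp.2]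
  segmentos.foldl
    (fun (linhas : List (List String)) (seg : List (String × Option String)) =>
      let linha := seg.filterMap (fun tv => pvConverterToken tv.1 tv.2)
      if linha ≠ [] then linhas ++ [linha] else linhas)
    []

-- ===== PRECONDITION & SPEC =====
-- Pre_ excludes tokens ("OPERADOR", None): there Python A appends None, so its result is
-- not a list of lists of strings (it leaves the declared type).
def Pre_extrair_linhas_tokens_de_programa_py (tokens_programa : List (String × Option String)) : Prop :=
  ∀ tv ∈ tokens_programa, tv.1 = "OPERADOR" → tv.2 ≠ none
instance (tokens_programa : List (String × Option String)) : Decidable (Pre_extrair_linhas_tokens_de_programa_py tokens_programa) := by unfold Pre_extrair_linhas_tokens_de_programa_py; infer_instance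

def pvWitness_extrair_linhas_tokens_de_programa_py : (List (String × Option String)) :=
  [("ID", some "x"), ("OPERADOR", some "+"), ("INT", some "1"), ("EOL", none), ("BLOCK", none)]

def Spec_extrair_linhas_tokens_de_programa_py (tokens_programa : List (String × Option String)) (out : List (List String)) : Prop := out = extrair_linhas_tokens_de_programa_py_alt tokens_programa
instance (tokens_programa : List (String × Option String)) (out : List (List String)) : Decidable (Spec_extrair_linhas_tokens_de_programa_py tokens_programa out) := by unfold Spec_extrair_linhas_tokens_de_programa_py; infer_instance

-- ===== CLAIM (what is proved, stated in full; the proofs are below) =====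
def Claim_equal_extrair_linhas_tokens_de_programa_py : Prop := ∀ (tokens_programa : List (String × Option String)), Dom_extrair_linhas_tokens_de_programa_py tokens_programa → Pre_extrair_linhas_tokens_de_programa_py tokens_programa → Spec_extrair_linhas_tokens_de_programa_py tokens_programa (extrair_linhas_tokens_de_programa_py tokens_programa)

-- ===== LEMMAS AND PROOFS =====
def pvRender (seg : List (String × Option String)) : List String :=
  seg.filterMap (fun tv => pvConverterToken tv.1 tv.2)

def pvOut (linhas : List (List String)) (seg : List (String × Option String)) : List (List String) :=
  if pvRender seg ≠ [] then linhas ++ [pvRender seg] else linhas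

def pvStepB (st : List (List (String × Option String)) × List (String × Option String))
    (tok : String × Option String) :
    List (List (String × Option String)) × List (String × Option String) :=
  if tok.1 = "EOL" then (st.1 ++ [st.2], []) else (st.1, st.2 ++ [tok])

theorem pvRender_append_one (c : List (String × Option String)) (t : String × Option String) :
    pvRender (c ++ [t]) = pvRender c ++ (pvConverterToken t.1 t.2).toList := by
  cases h : pvConverterToken t.1 t.2 <;>
    simp [pvRender, List.filterMap_append, h]

theorem pvAlt_eq_foldl (ts : List (String × Option String)) :
    extrair_linhas_tokens_de_programa_py_alt ts =
      (let sp := ts.foldl pvStepB ([], []); pvOut ((sp.1).foldl pvOut []) sp.2) := by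
  have h : extrair_linhas_tokens_de_programa_py_alt ts =
      ((ts.foldl pvStepB ([], [])).1 ++ [(ts.foldl pvStepB ([], [])).2]).foldl pvOut [] := rfl
  rw [h, List.foldl_append]
  rfl

theorem pvKey (ts : List (String × Option String))
    (hpre : ∀ tv ∈ ts, tv.1 = "OPERADOR" → tv.2 ≠ none) :
    ∀ (S : List (List (String × Option String))) (c : List (String × Option String)),
      (let st := ts.foldl pvStepA (S.foldl pvOut [], pvRender c)
       if st.2 ≠ [] then st.1 ++ [st.2] else st.1) =
      (let sp := ts.foldl pvStepB (S, c); pvOut ((sp.1).foldl pvOut []) sp.2) := by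
  induction ts with
  | nil =>
    intro S c
    simp [pvOut]
  | cons tv rest ih =>
    intro S c
    have hpre' : ∀ x ∈ rest, x.1 = "OPERADOR" → x.2 ≠ none := fun x hx => hpre x (List.mem_cons_of_mem _ hx)
    have hop : tv.1 = "OPERADOR" → tv.2 ≠ none := hpre tv List.mem_cons_self
    simp only [List.foldl_cons]
    by_cases hEol : tv.1 = "EOL"
    · -- EOL: A flushes when non-empty, B closes the segment
      have hA : pvStepA (S.foldl pvOut [], pvRender c) tv = ((S ++ [c]).foldl pvOut [], pvRender []) := by
        simp only [pvStepA, List.foldl_append, List.foldl]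
        have h1 : ¬ (tv.1 = "START_CMD" ∨ tv.1 = "END_CMD") := by
          rintro (h | h) <;> rw [h] at hEol <;> simp at hEol
        rw [if_neg h1, if_pos hEol]
        unfold pvOut pvRender
        by_cases hc : List.filterMap (fun tv => pvConverterToken tv.1 tv.2) c = [] <;> simp [hc]
      rw [hA]
      have hB : pvStepB (S, c) tv = (S ++ [c], []) := by simp [pvStepB, hEol]
      rw [hB]
      exact ih hpre' (S ++ [c]) []
    · -- non-EOL: both extend the current segment/line consistently
      have hB : pvStepB (S, c) tv = (S, c ++ [tv]) := by simp [pvStepB, hEol]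
      rw [hB]
      have hA : pvStepA (S.foldl pvOut [], pvRender c) tv = (S.foldl pvOut [], pvRender (c ++ [tv])) := by
        rw [pvRender_append_one]
        simp only [pvStepA, pvConverterToken]
        by_cases h1 : tv.1 = "START_CMD" ∨ tv.1 = "END_CMD"
        · have h2 : ¬ tv.1 = "LPAREN" := by rintro h; rcases h1 with h1 | h1 <;> rw [h] at h1 <;> simp at h1
          have h3 : ¬ tv.1 = "RPAREN" := by rintro h; rcases h1 with h1 | h1 <;> rw [h] at h1 <;> simp at h1
          have h4 : ¬ tv.1 = "OPERADOR" := by rintro h; rcases h1 with h1 | h1 <;> rw [h] at h1 <;> simp at h1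
          have h5 : tv.1 ∉ pvNomeados := by
            rcases h1 with h1 | h1 <;> rw [h1] <;> decide
          simp [h1, h2, h3, h4, h5]
        · rw [if_neg h1, if_neg hEol]
          by_cases h2 : tv.1 = "LPAREN"
          · simp [h2]
          by_cases h3 : tv.1 = "RPAREN"
          · simp [h3]
          by_cases h4 : tv.1 = "OPERADOR"
          · obtain ⟨v, hv⟩ := Option.ne_none_iff_exists'.mp (hop h4)
            simp [h4, hv]
          by_cases h5 : tv.1 ∈ pvNomeados
          · simp [h2, h3, h4, h5]
          · simp [h2, h3, h4, h5]
      rw [hA]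
      exact ih hpre' S (c ++ [tv])

-- ===== VERDICT (by name: the statement is the Claim_ definition above) =====
theorem extrair_linhas_tokens_de_programa_py_spec : Claim_equal_extrair_linhas_tokens_de_programa_py := by
  intro ts _ hpre
  unfold Spec_extrair_linhas_tokens_de_programa_py extrair_linhas_tokens_de_programa_py
  rw [pvAlt_eq_foldl]
  by_cases hts : ts = []
  · subst hts; simp [pvOut, pvRender]
  · rw [if_neg hts]
    have := pvKey ts hpre [] []
    simpa [pvOut, pvRender] using this
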